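-- pv_equiv track=rewrite | github.com/mytechnic/DiabloUtil | DiabloCloneStarHunterModule/D2ServerIp.py | getGameIpList
-- ===== SOURCE A (Python) =====
-- def getClientIpList():
--     return [
--         '24.105.29.76', '34.117.122.6',
--         '37.244.28.80', '37.244.28.180', '37.244.54.10',
--         '137.221.106.88', '137.221.106.188', '137.221.105.152',
--         '117.52.35.45', '117.52.35.79', '117.52.35.179'
--     ]
--
-- def getGameIpList(serverIpList):
--     clientIpList = getClientIpList()
--     gameIpList = []
--     for ip in serverIpList:
--         if ip in clientIpList:
--             continue
--
--         if (ip.startswith('34.')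
--                 or ip.startswith('35.')
--                 or ip.startswith('104.')
--                 or ip.startswith('158.')
--                 or ip.startswith('37.')):
--             if ip not in gameIpList:
--                 gameIpList.append(ip)
--
--     return gameIpList
-- ===== SOURCE B (Python) =====
-- def getClientIpList():
--     return [
--         '24.105.29.76', '34.117.122.6',
--         '37.244.28.80', '37.244.28.180', '37.244.54.10',
--         '137.221.106.88', '137.221.106.188', '137.221.105.152',
--         '117.52.35.45', '117.52.35.79', '117.52.35.179'
--     ]
--
-- def getGameIpList(serverIpList):
--     clientIpList = getClientIpList()
--
--     def isGameIp(ip):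
--         return (ip not in clientIpList
--                 and ip.startswith(('34.', '35.', '104.', '158.', '37.')))
--
--     result = []
--     rest = list(serverIpList)   # the not-yet-consumed input
--     i = 0                       # rest[i:] is what is still to process
--     while i < len(rest):
--         head = rest[i]
--         if isGameIp(head):
--             result.append(head)
--             # dedup by pruning: drop every later occurrence of head from the input
--             rest = [x for x in rest[i + 1:] if x != head]
--             i = 0
--         else:
--             i += 1
--     return result
-- ===== Notes on version B (the rewrite author's own statement) =====
-- stated objective: alternative
-- what changed: Instead of A's append-if-absent accumulator, B never inspects its output: it consumes the input front-to-back and, whenever it emits an IP, deletes all later occurrences of that IP from the still-unprocessed input, so dedup happens by pruning the future input rather than by membership tests on the growing result.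
import Mathlib
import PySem

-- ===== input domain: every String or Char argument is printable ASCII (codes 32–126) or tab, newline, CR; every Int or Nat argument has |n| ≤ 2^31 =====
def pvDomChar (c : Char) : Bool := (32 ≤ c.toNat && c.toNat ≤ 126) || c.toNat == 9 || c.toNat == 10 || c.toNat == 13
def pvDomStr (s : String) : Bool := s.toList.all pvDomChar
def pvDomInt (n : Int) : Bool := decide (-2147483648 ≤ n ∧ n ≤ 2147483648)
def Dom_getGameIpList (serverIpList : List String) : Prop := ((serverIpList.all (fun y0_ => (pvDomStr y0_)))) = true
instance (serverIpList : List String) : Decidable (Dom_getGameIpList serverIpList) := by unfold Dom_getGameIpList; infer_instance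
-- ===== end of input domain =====

-- B removes A's append-if-absent accumulator: it emits qualifying IPs head-first and
-- dedups by pruning later occurrences from the remaining input (objective: alternative).


-- ===== PORT A =====
def getClientIpList : List String :=
  [ "24.105.29.76", "34.117.122.6",
    "37.244.28.80", "37.244.28.180", "37.244.54.10",
    "137.221.106.88", "137.221.106.188", "137.221.105.152",
    "117.52.35.45", "117.52.35.79", "117.52.35.179" ]

def getGameIpList (serverIpList : List String) : List String :=
  serverIpList.foldl (fun gameIpList ip =>
    if getClientIpList.contains ip then gameIpList
    else if PySem.Str.startswith ip "34." || PySem.Str.startswith ip "35."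
            || PySem.Str.startswith ip "104." || PySem.Str.startswith ip "158."
            || PySem.Str.startswith ip "37." then
      if gameIpList.contains ip then gameIpList else gameIpList ++ [ip]
    else gameIpList) []

-- ===== PORT B =====
-- Source B's isGameIp: not a client IP, and startswith one of the tuple's prefixes
def pvIsGameIp (ip : String) : Bool :=
  !(getClientIpList.contains ip)
    && (PySem.Str.startswith ip "34." || PySem.Str.startswith ip "35."
        || PySem.Str.startswith ip "104." || PySem.Str.startswith ip "158."
        || PySem.Str.startswith ip "37.")

-- Source B's while loop over the unprocessed input rest[i:]: each iteration consumes its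
-- head (i += 1), and when the head is emitted every later occurrence of it is filtered
-- out of the remaining input (rest = pruned suffix, i = 0). The recursion argument here
-- is exactly rest[i:].
def getGameIpList_alt : List String → List String
  | [] => []
  | head :: tail =>
    if pvIsGameIp head then
      head :: getGameIpList_alt (tail.filter (fun x => x ≠ head))
    else getGameIpList_alt tail
termination_by l => l.length
decreasing_by
  · have h1 := List.length_filter_le (fun x : {x // x ∈ tail} => decide (↑x ≠ head)) tail.attach
    simp at h1 ⊢
    omega
  · exact Nat.lt_succ_self _

-- ===== PRECONDITION & SPEC =====
def Spec_getGameIpList (serverIpList : List String) (out : List String) : Prop := out = getGameIpList_alt serverIpList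
instance (serverIpList : List String) (out : List String) : Decidable (Spec_getGameIpList serverIpList out) := by unfold Spec_getGameIpList; infer_instance

-- ===== CLAIM (what is proved, stated in full; the proofs are below) =====
def Claim_equal_getGameIpList : Prop := ∀ (serverIpList : List String), Dom_getGameIpList serverIpList → Spec_getGameIpList serverIpList (getGameIpList serverIpList)

-- ===== LEMMAS AND PROOFS =====

-- one unfolding step of B's loop
theorem pv_alt_cons (x : String) (l : List String) :
    getGameIpList_alt (x :: l)
      = if pvIsGameIp x then x :: getGameIpList_alt (l.filter (fun y => y ≠ x))
        else getGameIpList_alt l := by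
  rw [getGameIpList_alt]

-- Invariant: A's loop from accumulator `acc` equals `acc ++ B (l with acc's elements removed)`.
theorem pv_loop_eq (l : List String) (acc : List String) :
    l.foldl (fun gameIpList ip =>
      if getClientIpList.contains ip then gameIpList
      else if PySem.Str.startswith ip "34." || PySem.Str.startswith ip "35."
              || PySem.Str.startswith ip "104." || PySem.Str.startswith ip "158."
              || PySem.Str.startswith ip "37." then
        if gameIpList.contains ip then gameIpList else gameIpList ++ [ip]
      else gameIpList) acc
    = acc ++ getGameIpList_alt (l.filter (fun x => !(acc.contains x))) := by
  induction l generalizing acc with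
  | nil => simp [getGameIpList_alt]
  | cons x xs ih =>
    simp only [List.foldl_cons, List.filter_cons]
    by_cases hc : getClientIpList.contains x = true
    · -- client ip: A skips; B's isGameIp is false, so it skips x as well
      have hg : pvIsGameIp x = false := by
        simp only [pvIsGameIp, hc, Bool.not_true, Bool.false_and]
      rw [if_pos hc, ih acc]
      congr 1
      by_cases hk : acc.contains x = true
      · rw [if_neg (by simpa using hk)]
      · rw [if_pos (by simpa using hk), pv_alt_cons, if_neg (by simp [hg])]
    · have hc' : getClientIpList.contains x = false := by simpa using hc
      by_cases hp : (PySem.Str.startswith x "34." || PySem.Str.startswith x "35."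
              || PySem.Str.startswith x "104." || PySem.Str.startswith x "158."
              || PySem.Str.startswith x "37.") = true
      · have hg : pvIsGameIp x = true := by
          simp only [pvIsGameIp, hc', Bool.not_false, Bool.true_and]; exact hp
        rw [if_neg hc, if_pos hp]
        by_cases hm : acc.contains x = true
        · -- already emitted: A skips; the acc filter drops x from B's input
          rw [if_pos hm, ih acc, if_neg (by simpa using hm)]
        · have hm' : acc.contains x = false := by simpa using hm
          rw [if_neg hm, ih (acc ++ [x]), if_pos (by simpa using hm')]
          have hfix : xs.filter (fun y => !((acc ++ [x]).contains y))
              = (xs.filter (fun y => !(acc.contains y))).filter (fun y => y ≠ x) := by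
            rw [List.filter_filter]
            apply List.filter_congr
            intro a _
            simp [Bool.and_comm]
          rw [hfix, pv_alt_cons, if_pos hg]
          simp
      · have hp' : (PySem.Str.startswith x "34." || PySem.Str.startswith x "35."
              || PySem.Str.startswith x "104." || PySem.Str.startswith x "158."
              || PySem.Str.startswith x "37.") = false := by simpa using hp
        have hg : pvIsGameIp x = false := by
          simp only [pvIsGameIp, hp', Bool.and_false]
        rw [if_neg hc, if_neg hp, ih acc]
        congr 1
        by_cases hk : acc.contains x = true
        · rw [if_neg (by simpa using hk)]
        · rw [if_pos (by simpa using hk), pv_alt_cons, if_neg (by simp [hg])]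

-- ===== VERDICT (by name: the statement is the Claim_ definition above) =====
theorem getGameIpList_spec : Claim_equal_getGameIpList := by
  intro l _
  unfold Spec_getGameIpList getGameIpList
  rw [pv_loop_eq]
  simp
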